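-- pv_equiv track=rewrite | github.com/kjihens/tftag-pipeline | src/tftag/primers.py | _count_trailing_gc
-- ===== SOURCE A (Python) =====
-- def _count_trailing_gc(primer: str) -> int:
--     """Count consecutive G/C bases from the 3' end of a primer."""
--     count = 0
--
--     for base in reversed(primer.upper()):
--         if base in ("G", "C"):
--             count += 1
--         else:
--             break
--
--     return count
-- ===== SOURCE B (Python) =====
-- def _count_trailing_gc(primer: str) -> int:
--     """Count consecutive G/C bases from the 3' end of a primer."""
--     return len(primer) - len(primer.upper().rstrip("GC"))
-- ===== Notes on version B (the rewrite author's own statement) =====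
-- stated objective: idiomatic
-- what changed: Replaces the reversed loop with explicit break/accumulator by a loop-free one-liner: uppercase, strip all trailing G/C with str.rstrip, and return the length difference.
import Mathlib
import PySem

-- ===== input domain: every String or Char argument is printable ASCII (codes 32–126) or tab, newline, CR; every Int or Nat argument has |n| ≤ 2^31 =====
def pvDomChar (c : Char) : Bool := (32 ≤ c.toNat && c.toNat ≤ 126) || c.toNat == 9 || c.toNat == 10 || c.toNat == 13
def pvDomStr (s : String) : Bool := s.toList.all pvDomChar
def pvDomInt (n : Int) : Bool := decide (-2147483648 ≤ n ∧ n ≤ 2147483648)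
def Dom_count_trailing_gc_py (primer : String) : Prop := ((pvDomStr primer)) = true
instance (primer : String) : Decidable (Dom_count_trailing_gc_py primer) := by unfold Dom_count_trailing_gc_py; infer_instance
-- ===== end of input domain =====

-- B replaces A's reversed loop with break by a loop-free rstrip("GC") length difference (idiomatic; same cost).

-- ===== PORT A =====
-- the for-loop over reversed(primer.upper()) with break: recursion stops at the first non-G/C base
def pvALoop : List Char → Int
  | [] => 0
  | base :: rest => if base = 'G' ∨ base = 'C' then 1 + pvALoop rest else 0

def count_trailing_gc_py (primer : String) : Int :=
  pvALoop (PySem.Chars.upper primer.toList).reverse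

-- ===== PORT B =====
-- hand port of str.rstrip("GC") (chars-set form, not in PySem): drop trailing chars of the set; exact on ASCII
def pvRstripGC (cs : List Char) : List Char :=
  (cs.reverse.dropWhile (fun c => c ∈ ("GC".toList))).reverse

def count_trailing_gc_py_alt (primer : String) : Int :=
  (primer.toList.length : Int) - (pvRstripGC (PySem.Chars.upper primer.toList)).length

-- ===== PRECONDITION & SPEC =====
def Spec_count_trailing_gc_py (primer : String) (out : Int) : Prop := out = count_trailing_gc_py_alt primer
instance (primer : String) (out : Int) : Decidable (Spec_count_trailing_gc_py primer out) := by unfold Spec_count_trailing_gc_py; infer_instance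

-- ===== CLAIM (what is proved, stated in full; the proofs are below) =====
def Claim_equal_count_trailing_gc_py : Prop := ∀ (primer : String), Dom_count_trailing_gc_py primer → Spec_count_trailing_gc_py primer (count_trailing_gc_py primer)

-- ===== LEMMAS AND PROOFS =====
theorem pvALoop_eq (l : List Char) :
    pvALoop l = (l.length : Int) - (l.dropWhile (fun c => c ∈ ("GC".toList))).length := by
  induction l with
  | nil => simp [pvALoop]
  | cons b rest ih =>
    by_cases h : b = 'G' ∨ b = 'C'
    · have hmem : b ∈ ("GC".toList) := by
        rcases h with h | h <;> simp [h]
      have hle := rest.length_dropWhile_le (fun c => decide (c ∈ ("GC".toList)))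
      simp only [pvALoop, if_pos h, ih, List.dropWhile, hmem, decide_true, List.length_cons]
      push_cast
      omega
    · push Not at h
      simp [pvALoop, List.dropWhile, h.1, h.2]

theorem len_upper (cs : List Char) : (PySem.Chars.upper cs).length = cs.length := by
  simp [PySem.Chars.upper]

-- ===== VERDICT (by name: the statement is the Claim_ definition above) =====
theorem count_trailing_gc_py_spec : Claim_equal_count_trailing_gc_py := by
  intro primer _
  unfold Spec_count_trailing_gc_py count_trailing_gc_py count_trailing_gc_py_alt pvRstripGC
  rw [pvALoop_eq]
  simp [len_upper]
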